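-- pv_equiv track=rewrite | github.com/pypi-data/pypi-mirror-51 | packages/keyframe-tools/keyframe-tools-0.0.1.tar.gz/keyframe-tools-0.0.1/keyframe_tools/utils.py | find_changing_indicies
-- ===== SOURCE A (Python) =====
-- def find_changing_indicies(lists):
--
--     # check all lists are the same length
--     if not (all(len(l) == len(lists[0]) for l in lists)):
--         raise ValueError("Arrays must be equal in length")
--
--     changing_indicies = []
--     for i in range(len(lists[0])):
--         # check if the i-th element in all lists are equal
--         if not all(l[i] == lists[0][i] for l in lists):
--             changing_indicies.append(i)
--
--     return changing_indicies
-- ===== SOURCE B (Python) =====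
-- def find_changing_indicies(lists):
--     # same explicit equal-length guard as the original
--     if not (all(len(l) == len(lists[0]) for l in lists)):
--         raise ValueError("Arrays must be equal in length")
--     first = lists[0]
--     # row-wise pass: accumulate a boolean difference mask, one OR-merge per list
--     mask = [False] * len(first)
--     for l in lists:
--         mask = [m or (a != b) for m, (a, b) in zip(mask, zip(l, first))]
--     # final scan of the mask
--     return [i for i, m in enumerate(mask) if m]
-- ===== Notes on version B (the rewrite author's own statement) =====
-- stated objective: alternative
-- what changed: B swaps the loop nesting: instead of A's per-position inner scan over all lists, B makes one pass over the lists, OR-merging each list's elementwise differences from the first into a boolean mask, and finally scans the mask once for the true indices.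
import Mathlib
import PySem

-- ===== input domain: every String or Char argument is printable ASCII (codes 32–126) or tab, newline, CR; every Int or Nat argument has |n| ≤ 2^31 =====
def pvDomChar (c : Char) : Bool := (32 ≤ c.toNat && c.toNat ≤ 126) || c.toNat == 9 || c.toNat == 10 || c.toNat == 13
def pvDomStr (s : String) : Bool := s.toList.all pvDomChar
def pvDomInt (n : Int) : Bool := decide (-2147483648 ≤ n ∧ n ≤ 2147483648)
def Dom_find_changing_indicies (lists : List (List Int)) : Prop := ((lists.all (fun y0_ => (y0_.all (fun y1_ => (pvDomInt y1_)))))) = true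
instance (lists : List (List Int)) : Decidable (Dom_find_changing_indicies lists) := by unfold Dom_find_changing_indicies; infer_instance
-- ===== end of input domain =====

-- B swaps the loop nesting: one pass over the lists OR-merging each list's elementwise
-- differences from the first into a boolean mask, then one scan of the mask; same cost,
-- a genuinely different traversal. Return value only (neither mutates).

-- ===== PORT A =====
-- A: guard that all lengths equal lists[0]'s, then for i in range(len(lists[0])) append i
-- when not all l[i] == lists[0][i].  The raising branches (ValueError / IndexError on [])
-- are outside Pre_; their value here is arbitrary ([]).
def find_changing_indicies (lists : List (List Int)) : List Int :=
  if ¬ (lists.all (fun l => l.length == (lists.headD []).length)) then []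
  else
    (PySem.List.pyRange 0 ((lists.headD []).length : Int) 1).foldl
      (fun acc i =>
        if ¬ (lists.all (fun l =>
            PySem.List.pyGetD l i 0 == PySem.List.pyGetD (lists.headD []) i 0)) then
          acc ++ [i]
        else acc) []

-- ===== PORT B =====
-- B: same guard; mask = [False]*len(first); for l in lists:
--   mask = [m or (a != b) for m, (a, b) in zip(mask, zip(l, first))];
-- return [i for i, m in enumerate(mask) if m]
def find_changing_indicies_alt (lists : List (List Int)) : List Int :=
  if ¬ (lists.all (fun l => l.length == (lists.headD []).length)) then []
  else
    let first := lists.headD []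
    let mask := lists.foldl
      (fun m l => (m.zip (l.zip first)).map (fun p => p.1 || !(p.2.1 == p.2.2)))
      (List.replicate first.length false)
    ((PySem.List.enumerate mask 0).filter (·.2)).map (·.1)

-- ===== PRECONDITION & SPEC =====
-- Pre_ excludes exactly the raising inputs: [] (IndexError at lists[0]) and unequal lengths (ValueError).
def Pre_find_changing_indicies (lists : List (List Int)) : Prop :=
  lists ≠ [] ∧ ∀ l ∈ lists, l.length = (lists.headD []).length
instance (lists : List (List Int)) : Decidable (Pre_find_changing_indicies lists) := by
  unfold Pre_find_changing_indicies; infer_instance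

def pvWitness_find_changing_indicies : List (List Int) := [[1, 2, 3], [1, 5, 3]]

def Spec_find_changing_indicies (lists : List (List Int)) (out : List Int) : Prop :=
  out = find_changing_indicies_alt lists
instance (lists : List (List Int)) (out : List Int) : Decidable (Spec_find_changing_indicies lists out) := by
  unfold Spec_find_changing_indicies; infer_instance

-- ===== CLAIM (what is proved, stated in full; the proofs are below) =====
def Claim_equal_find_changing_indicies : Prop :=
  ∀ (lists : List (List Int)), Dom_find_changing_indicies lists →
    Pre_find_changing_indicies lists →
    Spec_find_changing_indicies lists (find_changing_indicies lists)

-- ===== LEMMAS AND PROOFS =====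

-- one OR-merge step on a mask given as a map over range n
theorem mask_step (n : Nat) (first l : List Int) (f : Nat → Bool)
    (hl : l.length = n) (hf : first.length = n) :
    ((((List.range n).map f).zip (l.zip first)).map
        (fun p => p.1 || !(p.2.1 == p.2.2)))
      = (List.range n).map (fun i => f i || !(l.getD i 0 == first.getD i 0)) := by
  apply List.ext_getElem
  · simp [hl, hf]
  · intro k h1 h2
    simp only [List.length_map, List.length_zip, List.length_range, hl, hf,
      min_self, List.length_range] at h1 h2 ⊢
    have hk : k < n := by simpa using h2
    simp [List.getElem_zip, hk, hl, hf]

-- the fold over the lists produces the difference mask, as a map over range n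
theorem mask_char (n : Nat) (first : List Int) (hf : first.length = n) :
    ∀ (L : List (List Int)) (f : Nat → Bool), (∀ l ∈ L, l.length = n) →
      L.foldl
        (fun m l => (m.zip (l.zip first)).map (fun p => p.1 || !(p.2.1 == p.2.2)))
        ((List.range n).map f)
      = (List.range n).map
          (fun i => f i || L.any (fun l => !(l.getD i 0 == first.getD i 0))) := by
  intro L
  induction L with
  | nil => intro f _; simp
  | cons a t ih =>
    intro f hlen
    have ha : a.length = n := hlen a (by simp)
    rw [List.foldl_cons, mask_step n first a f ha hf,
        ih _ (fun l hl => hlen l (by simp [hl]))]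
    apply List.map_congr_left
    intro i _
    simp [Bool.or_assoc]

-- filter-map over tagged values collapses to a filter over the tags
theorem filter_map_pair (R : List Int) (c : Int → Bool) :
    ((R.map (fun j => (j, c j))).filter (fun x => x.2)).map (·.1)
      = R.filter (fun j => c j) := by
  induction R with
  | nil => simp
  | cons a t ih =>
    simp only [List.map_cons, List.filter_cons]
    by_cases h : c a = true
    · simp [h, ih]
    · simp [h, ih]

theorem find_changing_indicies_spec' (lists : List (List Int))
    (hpre : Pre_find_changing_indicies lists) :
    find_changing_indicies lists = find_changing_indicies_alt lists := by
  obtain ⟨hne, hlen⟩ := hpre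
  have hlen' : ∀ x ∈ lists, x.length = (lists.head?.getD []).length := by
    simpa using hlen
  unfold find_changing_indicies find_changing_indicies_alt
  rw [if_neg (by simp; exact hlen'), if_neg (by simp; exact hlen')]
  dsimp only
  set first := lists.headD [] with hfirst
  set n := first.length with hn
  -- B side: the fold is the difference mask
  have hrepl : List.replicate n false = (List.range n).map (fun _ => false) := by
    simp [List.map_const']
  rw [hrepl, mask_char n first rfl lists (fun _ => false) hlen]
  simp only [Bool.false_or]
  set g : Nat → Bool :=
    fun i => lists.any (fun l => !(l.getD i 0 == first.getD i 0)) with hg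
  -- enumerate of the mask as a tagged range
  rw [PySem.List.enumerate_eq_map_pyRange (d := false)]
  have hlenmap : (((List.range n).map g) : List Bool).length = n := by simp
  rw [PySem.List.len_eq, hlenmap]
  have hB : (PySem.List.pyRange 0 (n : Int) 1).map
        (fun j => (j, PySem.List.pyGetD ((List.range n).map g) j false))
      = (PySem.List.pyRange 0 (n : Int) 1).map (fun j => (j, g j.toNat)) := by
    apply List.map_congr_left
    intro j hj
    rw [PySem.List.mem_pyRange_one] at hj
    have h0j : 0 ≤ j := hj.1
    have hjt : j.toNat < n := by omega
    congr 1
    rw [PySem.List.pyGetD_eq_getElem _ _ h0j (by simpa using hj.2)]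
    simp
  rw [hB, filter_map_pair (PySem.List.pyRange 0 (n : Int) 1) (fun j => g j.toNat)]
  -- A side: the append-if fold is a filter
  rw [PySem.List.foldl_append_ite_eq_filter]
  simp only [List.nil_append]
  -- the two filter predicates agree on the range
  apply List.filter_congr
  intro j hj
  rw [PySem.List.mem_pyRange_one] at hj
  have h0j : 0 ≤ j := hj.1
  have hjt : j.toNat < n := by omega
  have hpt : ∀ l ∈ lists,
      (PySem.List.pyGetD l j 0 == PySem.List.pyGetD first j 0)
        = (l.getD j.toNat 0 == first.getD j.toNat 0) := by
    intro l hl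
    have hll : l.length = n := by simpa [hfirst] using hlen l hl
    rw [PySem.List.pyGetD_eq_getElem _ _ h0j (by omega),
        PySem.List.pyGetD_eq_getElem _ _ h0j (by omega)]
    rw [List.getD_eq_getElem l 0 (by omega), List.getD_eq_getElem first 0 (by omega)]
  rw [hg]
  simp only [decide_not]
  rw [Bool.eq_iff_iff]
  simp only [Bool.not_eq_eq_eq_not, Bool.not_true, List.all_eq_true, List.any_eq_true,
    decide_eq_false_iff_not]
  constructor
  · intro h
    by_contra hc
    push Not at hc
    apply h
    intro l hl
    have := hc l hl
    rw [hpt l hl]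
    simpa using this
  · rintro ⟨l, hl, hne2⟩ hall
    have := hall l hl
    rw [hpt l hl] at this
    rw [this] at hne2
    simp at hne2

-- ===== VERDICT (by name: the statement is the Claim_ definition above) =====
theorem find_changing_indicies_spec : Claim_equal_find_changing_indicies := by
  intro lists _ hpre
  exact find_changing_indicies_spec' lists hpre
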